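-- pv_equiv track=rewrite | github.com/Sackey-yuan/algorithm014-algorithm014 | Week_03/test.py | shuttleInBuildings
-- ===== SOURCE A (Python) =====
-- def shuttleInBuildings(heights, k, x, y):
--     # write your code here.
--     l = len(heights)
--     res_list = []
--     def help(i,res):
--         if not res_list or res < min(res_list):
--             if i == l-1:
--                 res_list.append(res)
--             else:
--                 fa = i + k + 1 if i+ k + 1 < l else l
--                 hight = heights[i]
--                 next_i = i
--                 for next_j in range(i + 1,fa):
--                     if heights[next_j] > hight:
--                         next_i, hight = next_j, heights[next_j]
--                 if next_i > i:
--                     help(next_i,res+x)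
--                 if i +1 < l :help(i + 1,res+y)
--                 if i + 2 < l:help(i + 2,res+y)
--     help(0,0)
--     return min(res_list)
-- ===== SOURCE B (Python) =====
-- def shuttleInBuildings(heights, k, x, y):
--     # Iterative version: explicit LIFO stack replays the pruned depth-first
--     # search, keeping the best completed cost as a single scalar.
--     l = len(heights)
--     best = None
--     stack = [(0, 0)]
--     while stack:
--         i, res = stack.pop()
--         if best is not None and best <= res:
--             continue
--         if i == l - 1:
--             best = res
--             continue
--         fa = min(i + k + 1, l)
--         ni, h = i, heights[i]
--         for j in range(i + 1, fa):
--             if heights[j] > h: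
--                 ni, h = j, heights[j]
--         # pushed in reverse so the jump branch is explored first, like A
--         if i + 2 < l:
--             stack.append((i + 2, res + y))
--         if i + 1 < l:
--             stack.append((i + 1, res + y))
--         if ni > i:
--             stack.append((ni, res + x))
--     return best
-- ===== Notes on version B (the rewrite author's own statement) =====
-- stated objective: alternative
-- what changed: A's recursive pruned depth-first search, which mutates a shared result list and recomputes min(res_list) at every call, is replaced by an iterative explicit-stack traversal of the same search tree that keeps only the best completed cost in a single scalar.
import Mathlib
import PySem

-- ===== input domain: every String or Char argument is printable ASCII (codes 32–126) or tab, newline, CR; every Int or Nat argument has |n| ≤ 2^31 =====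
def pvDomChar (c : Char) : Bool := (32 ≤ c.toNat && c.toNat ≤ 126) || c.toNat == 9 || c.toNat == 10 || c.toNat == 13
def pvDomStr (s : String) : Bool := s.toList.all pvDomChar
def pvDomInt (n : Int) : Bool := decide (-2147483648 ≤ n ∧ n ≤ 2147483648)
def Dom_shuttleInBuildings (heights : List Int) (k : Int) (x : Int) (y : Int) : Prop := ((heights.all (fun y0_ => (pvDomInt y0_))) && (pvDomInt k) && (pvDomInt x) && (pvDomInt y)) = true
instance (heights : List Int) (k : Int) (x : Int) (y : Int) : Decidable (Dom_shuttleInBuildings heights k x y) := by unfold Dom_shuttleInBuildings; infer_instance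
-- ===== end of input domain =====

-- B replaces A's recursive pruned DFS (a mutated result list whose min is recomputed at
-- every call) by an iterative explicit-stack traversal of the same search tree keeping the
-- best completed cost as one scalar; objective: alternative decomposition, same results.

-- ===== PORT A =====
-- the inner `for next_j in range(i+1, fa)` scan for the highest building, identical in both
-- Python sources, so shared by both ports
def pvBestJump (heights : List Int) (i fa : Int) : Int × Int :=
  (PySem.List.pyRange (i + 1) fa).foldl
    (fun p j => if p.2 < PySem.List.pyGetD heights j 0 then (j, PySem.List.pyGetD heights j 0) else p)
    (i, PySem.List.pyGetD heights i 0)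

-- A's recursive `help(i, res)` threading the mutable `res_list`; fuel is a totalization
-- guard only (heights.length + 1 always suffices: i strictly increases and stays below l).
-- `heights[i]` is ported as pyGetD _ _ 0: the index is in range on every call A makes when
-- heights ≠ [] (Pre_), and heights = [] (where Python raises IndexError) is outside Pre_.
def helpA (heights : List Int) (l k x y : Int) : Nat → Int → Int → List Int → List Int
  | 0, _, _, rl => rl
  | fuel + 1, i, res, rl =>
    if (match PySem.List.min? rl (fun v => v) with
        | none => true
        | some m => decide (res < m)) then
      if i = l - 1 then rl ++ [res]
      else
        let fa := if i + k + 1 < l then i + k + 1 else l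
        let p := pvBestJump heights i fa
        let rl1 := if i < p.1 then helpA heights l k x y fuel p.1 (res + x) rl else rl
        let rl2 := if i + 1 < l then helpA heights l k x y fuel (i + 1) (res + y) rl1 else rl1
        if i + 2 < l then helpA heights l k x y fuel (i + 2) (res + y) rl2 else rl2
    else rl

def shuttleInBuildings (heights : List Int) (k : Int) (x : Int) (y : Int) : Int :=
  let l : Int := (heights.length : Int)
  (PySem.List.min? (helpA heights l k x y (heights.length + 1) 0 0 []) (fun v => v)).getD 0

-- ===== PORT B =====
-- B's while-loop over the explicit stack; fuel is a totalization guard only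
-- (3 ^ (heights.length + 1) always suffices, proved by `runB_stable` below).
def runB (heights : List Int) (l k x y : Int) : Nat → List (Int × Int) → Option Int → Option Int
  | _, [], best => best
  | 0, _ :: _, best => best
  | fuel + 1, (i, res) :: st, best =>
    if (match best with
        | none => false
        | some b => decide (b ≤ res)) then
      runB heights l k x y fuel st best
    else if i = l - 1 then
      runB heights l k x y fuel st (some res)
    else
      let fa := min (i + k + 1) l
      let p := pvBestJump heights i fa
      let st1 := if i + 2 < l then (i + 2, res + y) :: st else st
      let st2 := if i + 1 < l then (i + 1, res + y) :: st1 else st1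
      let st3 := if i < p.1 then (p.1, res + x) :: st2 else st2
      runB heights l k x y fuel st3 best

def shuttleInBuildings_alt (heights : List Int) (k : Int) (x : Int) (y : Int) : Int :=
  let l : Int := (heights.length : Int)
  (runB heights l k x y (3 ^ (heights.length + 1)) [(0, 0)] none).getD 0

-- ===== PRECONDITION & SPEC =====
-- Pre_ excludes only heights = [], on which Python A raises IndexError (heights[0]).
def Pre_shuttleInBuildings (heights : List Int) (k : Int) (x : Int) (y : Int) : Prop :=
  heights ≠ []
instance (heights : List Int) (k : Int) (x : Int) (y : Int) : Decidable (Pre_shuttleInBuildings heights k x y) := by unfold Pre_shuttleInBuildings; infer_instance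

def pvWitness_shuttleInBuildings : List Int × Int × Int × Int := ([2, 5, 1, 7], 2, 3, 1)

def Spec_shuttleInBuildings (heights : List Int) (k : Int) (x : Int) (y : Int) (out : Int) : Prop := out = shuttleInBuildings_alt heights k x y
instance (heights : List Int) (k : Int) (x : Int) (y : Int) (out : Int) : Decidable (Spec_shuttleInBuildings heights k x y out) := by unfold Spec_shuttleInBuildings; infer_instance

-- ===== CLAIM (what is proved, stated in full; the proofs are below) =====
def Claim_equal_shuttleInBuildings : Prop := ∀ (heights : List Int) (k : Int) (x : Int) (y : Int), Dom_shuttleInBuildings heights k x y → Pre_shuttleInBuildings heights k x y → Spec_shuttleInBuildings heights k x y (shuttleInBuildings heights k x y)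

-- ===== LEMMAS AND PROOFS =====

-- weight of one stack frame at index i, and of a whole stack
def pvW (l i : Int) : Nat := 3 ^ (l - i).toNat
def pvWS (l : Int) (st : List (Int × Int)) : Nat := (st.map (fun f => pvW l f.1)).sum

lemma pvW_pos (l i : Int) : 0 < pvW l i := by unfold pvW; positivity

lemma pvWS_cons (l i r : Int) (st : List (Int × Int)) :
    pvWS l ((i, r) :: st) = pvW l i + pvWS l st := by simp [pvWS]

-- a fold that either keeps the pair or replaces it by a list element
lemma foldl_fst_mem (g : Int → Int) :
    ∀ (lst : List Int) (p : Int × Int),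
      (lst.foldl (fun p j => if p.2 < g j then (j, g j) else p) p).1 = p.1 ∨
        (lst.foldl (fun p j => if p.2 < g j then (j, g j) else p) p).1 ∈ lst := by
  intro lst
  induction lst with
  | nil => intro p; left; rfl
  | cons a t ih =>
    intro p
    simp only [List.foldl_cons]
    by_cases hc : p.2 < g a
    · rw [if_pos hc]
      rcases ih (a, g a) with h | h
      · right; rw [h]; exact List.mem_cons_self ..
      · right; exact List.mem_cons_of_mem _ h
    · rw [if_neg hc]
      rcases ih p with h | h
      · left; exact h
      · right; exact List.mem_cons_of_mem _ h

-- the best-jump scan returns i itself or an index in [i+1, fa)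
lemma pvBestJump_fst (heights : List Int) (i fa : Int) :
    (pvBestJump heights i fa).1 = i ∨
      (i + 1 ≤ (pvBestJump heights i fa).1 ∧ (pvBestJump heights i fa).1 < fa) := by
  unfold pvBestJump
  rcases foldl_fst_mem (fun j => PySem.List.pyGetD heights j 0)
      (PySem.List.pyRange (i + 1) fa) (i, PySem.List.pyGetD heights i 0) with h | h
  · left; exact h
  · right; exact PySem.List.mem_pyRange_one.mp h

-- appending a strictly smaller value makes it the minimum
lemma min?_append_lt (rl : List Int) (res : Int)
    (h : ∀ m, PySem.List.min? rl (fun v => v) = some m → res < m) :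
    PySem.List.min? (rl ++ [res]) (fun v => v) = some res := by
  cases rl with
  | nil => simp [PySem.List.min?_id_cons]
  | cons a t =>
    have hm := h (List.foldl min a t) (PySem.List.min?_id_cons a t)
    rw [List.cons_append, PySem.List.min?_id_cons, List.foldl_append]
    simp only [List.foldl_cons, List.foldl_nil]
    rw [min_eq_right (le_of_lt hm)]

-- the frames pushed for one popped frame weigh strictly less than that frame
lemma pvWS_step (heights : List Int) (k x y l i res : Int) (st : List (Int × Int))
    (_hne : i ≠ l - 1) :
    pvWS l ((if i < (pvBestJump heights i (min (i + k + 1) l)).1 then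
               ((pvBestJump heights i (min (i + k + 1) l)).1, res + x) ::
                 (if i + 1 < l then (i + 1, res + y) ::
                    (if i + 2 < l then (i + 2, res + y) :: st else st)
                  else (if i + 2 < l then (i + 2, res + y) :: st else st))
             else
               (if i + 1 < l then (i + 1, res + y) ::
                  (if i + 2 < l then (i + 2, res + y) :: st else st)
                else (if i + 2 < l then (i + 2, res + y) :: st else st)))) <
      pvW l i + pvWS l st := by
  have hbj := pvBestJump_fst heights i (min (i + k + 1) l)
  by_cases h1 : i + 1 < l
  · have he : 2 ≤ (l - i).toNat := by omega
    have hwi : pvW l i = 3 ^ (l - i).toNat := rfl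
    have hw1 : pvW l (i + 1) = 3 ^ ((l - i).toNat - 1) := by
      unfold pvW; congr 1; omega
    have hw2 : pvW l (i + 2) = 3 ^ ((l - i).toNat - 2) := by
      unfold pvW; congr 1; omega
    have hpow : 3 ^ ((l - i).toNat - 1) + 3 ^ ((l - i).toNat - 1) + 3 ^ ((l - i).toNat - 2)
        < 3 ^ (l - i).toNat := by
      obtain ⟨d, hd⟩ : ∃ d, (l - i).toNat = d + 2 := ⟨(l - i).toNat - 2, by omega⟩
      rw [hd]
      have h5 : d + 2 - 1 = d + 1 := by omega
      have h6 : d + 2 - 2 = d := by omega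
      rw [h5, h6]
      have ha : 0 < 3 ^ d := by positivity
      simp only [pow_succ]
      omega
    have hc1 : 0 < 3 ^ ((l - i).toNat - 1) := by positivity
    have hc2 : 0 < 3 ^ ((l - i).toNat - 2) := by positivity
    have hjw : i < (pvBestJump heights i (min (i + k + 1) l)).1 →
        pvW l (pvBestJump heights i (min (i + k + 1) l)).1 ≤ 3 ^ ((l - i).toNat - 1) := by
      intro hij
      have hle : (l - (pvBestJump heights i (min (i + k + 1) l)).1).toNat ≤ (l - i).toNat - 1 := by
        omega
      exact Nat.pow_le_pow_right (by norm_num) hle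
    split_ifs with hj h2 h2
    · have := hjw hj
      simp only [pvWS_cons]
      omega
    · have := hjw hj
      simp only [pvWS_cons]
      omega
    · simp only [pvWS_cons]; omega
    · simp only [pvWS_cons]; omega
  · have hj : ¬ i < (pvBestJump heights i (min (i + k + 1) l)).1 := by
      rcases hbj with h | ⟨ha, hb⟩
      · omega
      · have : min (i + k + 1) l ≤ l := min_le_right _ _
        omega
    have h2 : ¬ i + 2 < l := by omega
    rw [if_neg hj, if_neg h1, if_neg h2]
    have := pvW_pos l i
    omega

-- runB is fuel-insensitive once the fuel reaches the stack's weight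
lemma runB_stable (heights : List Int) (l k x y : Int) :
    ∀ (n : Nat) (st : List (Int × Int)) (best : Option Int) (fuel : Nat),
      pvWS l st = n → n ≤ fuel →
      runB heights l k x y fuel st best = runB heights l k x y n st best := by
  intro n
  induction n using Nat.strong_induction_on with
  | _ n ih =>
    intro st best fuel hW hle
    cases st with
    | nil => cases fuel <;> cases n <;> simp [runB]
    | cons f st' =>
      obtain ⟨i, res⟩ := f
      have hw1 := pvW_pos l i
      have hcons : pvWS l ((i, res) :: st') = pvW l i + pvWS l st' := pvWS_cons ..
      obtain ⟨n', rfl⟩ : ∃ n', n = n' + 1 := ⟨n - 1, by omega⟩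
      obtain ⟨m, rfl⟩ : ∃ m, fuel = m + 1 := ⟨fuel - 1, by omega⟩
      simp only [runB]
      have hst' : pvWS l st' ≤ n' := by omega
      by_cases hp : (match best with | none => false | some b => decide (b ≤ res)) = true
      · rw [if_pos hp, if_pos hp,
            ih (pvWS l st') (by omega) st' best m rfl (by omega),
            ih (pvWS l st') (by omega) st' best n' rfl hst']
      · rw [if_neg hp, if_neg hp]
        by_cases hl : i = l - 1
        · rw [if_pos hl, if_pos hl,
              ih (pvWS l st') (by omega) st' (some res) m rfl (by omega),
              ih (pvWS l st') (by omega) st' (some res) n' rfl hst']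
        · rw [if_neg hl, if_neg hl]
          have hstep := pvWS_step heights k x y l i res st' hl
          set st3 := (if i < (pvBestJump heights i (min (i + k + 1) l)).1 then
                 ((pvBestJump heights i (min (i + k + 1) l)).1, res + x) ::
                   (if i + 1 < l then (i + 1, res + y) ::
                      (if i + 2 < l then (i + 2, res + y) :: st' else st')
                    else (if i + 2 < l then (i + 2, res + y) :: st' else st'))
               else
                 (if i + 1 < l then (i + 1, res + y) ::
                    (if i + 2 < l then (i + 2, res + y) :: st' else st')
                  else (if i + 2 < l then (i + 2, res + y) :: st' else st'))) with hst3
          rw [ih (pvWS l st3) (by omega) st3 best m rfl (by omega),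
              ih (pvWS l st3) (by omega) st3 best n' rfl (by omega)]

lemma pvFa_eq (i k l : Int) : (if i + k + 1 < l then i + k + 1 else l) = min (i + k + 1) l := by
  split <;> omega

-- simulation: popping one frame of B performs exactly A's recursive call on that frame,
-- with B's scalar `best` tracking the minimum of A's `res_list`
lemma sim (heights : List Int) (l k x y : Int) :
    ∀ (fa : Nat) (i res : Int) (st : List (Int × Int)) (rl : List Int),
      (l - i).toNat + 1 ≤ fa →
      runB heights l k x y (pvW l i + pvWS l st) ((i, res) :: st)
          (PySem.List.min? rl (fun v => v)) =
        runB heights l k x y (pvWS l st) st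
          (PySem.List.min? (helpA heights l k x y fa i res rl) (fun v => v)) := by
  intro fa
  induction fa with
  | zero => intro i res st rl h; omega
  | succ fa ih =>
    intro i res st rl hfa
    have hw1 := pvW_pos l i
    obtain ⟨m, hm⟩ : ∃ m, pvW l i + pvWS l st = m + 1 :=
      ⟨pvW l i + pvWS l st - 1, by omega⟩
    rw [hm]
    simp only [runB, helpA]
    by_cases hok : (match PySem.List.min? rl (fun v => v) with
        | none => true
        | some m => decide (res < m)) = true
    · have hpr : (match PySem.List.min? rl (fun v => v) with
          | none => false
          | some b => decide (b ≤ res)) = false := by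
        cases hmin : PySem.List.min? rl (fun v => v) with
        | none => rfl
        | some mv => rw [hmin] at hok; simp at hok ⊢; omega
      simp only [hpr, hok, Bool.false_eq_true, if_false, if_true]
      by_cases hleaf : i = l - 1
      · simp only [if_pos hleaf]
        have hcond : ∀ mv, PySem.List.min? rl (fun v => v) = some mv → res < mv := by
          intro mv hmv; rw [hmv] at hok; simpa using hok
        rw [min?_append_lt rl res hcond]
        exact runB_stable heights l k x y (pvWS l st) st (some res) m rfl (by omega)
      · simp only [if_neg hleaf, pvFa_eq]
        set p := pvBestJump heights i (min (i + k + 1) l) with hpdef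
        have hstep := pvWS_step heights k x y l i res st hleaf
        rw [← hpdef] at hstep
        by_cases h1 : i + 1 < l
        · by_cases hj : i < p.1 <;> by_cases h2 : i + 2 < l
          · simp only [if_pos hj, if_pos h1, if_pos h2] at hstep ⊢
            rw [runB_stable heights l k x y
                  (pvWS l ((p.1, res + x) :: (i + 1, res + y) :: (i + 2, res + y) :: st))
                  ((p.1, res + x) :: (i + 1, res + y) :: (i + 2, res + y) :: st)
                  (PySem.List.min? rl (fun v => v)) m rfl (by omega),
                pvWS_cons l p.1 (res + x) ((i + 1, res + y) :: (i + 2, res + y) :: st),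
                ih p.1 (res + x) ((i + 1, res + y) :: (i + 2, res + y) :: st) rl (by omega),
                pvWS_cons l (i + 1) (res + y) ((i + 2, res + y) :: st),
                ih (i + 1) (res + y) ((i + 2, res + y) :: st) _ (by omega),
                pvWS_cons l (i + 2) (res + y) st,
                ih (i + 2) (res + y) st _ (by omega)]
          · simp only [if_pos hj, if_pos h1, if_neg h2] at hstep ⊢
            rw [runB_stable heights l k x y
                  (pvWS l ((p.1, res + x) :: (i + 1, res + y) :: st))
                  ((p.1, res + x) :: (i + 1, res + y) :: st)
                  (PySem.List.min? rl (fun v => v)) m rfl (by omega),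
                pvWS_cons l p.1 (res + x) ((i + 1, res + y) :: st),
                ih p.1 (res + x) ((i + 1, res + y) :: st) rl (by omega),
                pvWS_cons l (i + 1) (res + y) st,
                ih (i + 1) (res + y) st _ (by omega)]
          · simp only [if_neg hj, if_pos h1, if_pos h2] at hstep ⊢
            rw [runB_stable heights l k x y
                  (pvWS l ((i + 1, res + y) :: (i + 2, res + y) :: st))
                  ((i + 1, res + y) :: (i + 2, res + y) :: st)
                  (PySem.List.min? rl (fun v => v)) m rfl (by omega),
                pvWS_cons l (i + 1) (res + y) ((i + 2, res + y) :: st),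
                ih (i + 1) (res + y) ((i + 2, res + y) :: st) rl (by omega),
                pvWS_cons l (i + 2) (res + y) st,
                ih (i + 2) (res + y) st _ (by omega)]
          · simp only [if_neg hj, if_pos h1, if_neg h2] at hstep ⊢
            rw [runB_stable heights l k x y
                  (pvWS l ((i + 1, res + y) :: st))
                  ((i + 1, res + y) :: st)
                  (PySem.List.min? rl (fun v => v)) m rfl (by omega),
                pvWS_cons l (i + 1) (res + y) st,
                ih (i + 1) (res + y) st rl (by omega)]
        · have hj : ¬ i < p.1 := by
            rcases pvBestJump_fst heights i (min (i + k + 1) l) with h | ⟨ha, hb⟩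
            · rw [← hpdef] at h; omega
            · rw [← hpdef] at ha hb
              have : min (i + k + 1) l ≤ l := min_le_right _ _
              omega
          have h2 : ¬ i + 2 < l := by omega
          simp only [if_neg hj, if_neg h1, if_neg h2]
          exact runB_stable heights l k x y (pvWS l st) st
            (PySem.List.min? rl (fun v => v)) m rfl (by omega)
    · have hpr : (match PySem.List.min? rl (fun v => v) with
          | none => false
          | some b => decide (b ≤ res)) = true := by
        cases hmin : PySem.List.min? rl (fun v => v) with
        | none => rw [hmin] at hok; simp at hok
        | some mv => rw [hmin] at hok; simp at hok ⊢; omega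
      simp only [hpr, if_true, if_neg hok]
      exact runB_stable heights l k x y (pvWS l st) st _ m rfl (by omega)

-- ===== VERDICT (by name: the statement is the Claim_ definition above) =====
theorem shuttleInBuildings_spec : Claim_equal_shuttleInBuildings := by
  intro heights k x y _ _
  unfold Spec_shuttleInBuildings shuttleInBuildings shuttleInBuildings_alt
  dsimp only
  have hnil : ∀ (fuel : Nat) (best : Option Int),
      runB heights (heights.length : Int) k x y fuel [] best = best := by
    intro fuel best; cases fuel <;> rfl
  have hfa : (((heights.length : Int)) - 0).toNat + 1 ≤ heights.length + 1 := by simp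
  have h2 := sim heights (heights.length : Int) k x y (heights.length + 1) 0 0 [] [] hfa
  have h1 : runB heights (heights.length : Int) k x y (3 ^ (heights.length + 1))
        [((0 : Int), (0 : Int))] none
      = runB heights (heights.length : Int) k x y
        (pvWS (heights.length : Int) [((0 : Int), (0 : Int))]) [((0 : Int), (0 : Int))] none := by
    apply runB_stable heights (heights.length : Int) k x y _ _ none _ rfl
    have hw : pvWS (heights.length : Int) [((0 : Int), (0 : Int))]
        = 3 ^ (((heights.length : Int) - 0).toNat) := by
      simp [pvWS, pvW]
    rw [hw]
    exact Nat.pow_le_pow_right (by norm_num) (by simp)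
  rw [h1, pvWS_cons]
  have h0 : (PySem.List.min? ([] : List Int) (fun v => v)) = none := rfl
  rw [h0] at h2
  rw [h2, hnil]
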